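-- pv_equiv track=rewrite | github.com/Krisyu7/jspilot | backend/app/services/job_fetcher.py | extract_best_apply_link
-- ===== SOURCE A (Python) =====
-- AGGREGATOR_DOMAINS = [
--     "indeed", "glassdoor", "ziprecruiter", "workopolis",
--     "eluta", "builtin", "monster", "careerbuilder",
--     "simplyhired", "jobbank", "workday", "bebee",
--     "sercanto", "jobzmall", "pitchmeai", "showbizjobs"
-- ]
--
-- def extract_best_apply_link(apply_options: list) -> dict:
--     if not apply_options:
--         return {"type": "unknown", "link": ""}
--
--     for option in apply_options:
--         link = option.get("link", "").lower()
--         if not any(agg in link for agg in AGGREGATOR_DOMAINS):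
--             return {"type": "company_site", "link": option["link"]}
--
--     for option in apply_options:
--         if "linkedin" in option.get("link", "").lower():
--             return {"type": "linkedin", "link": option["link"]}
--
--     return {"type": "other", "link": apply_options[0].get("link", "")}
-- ===== SOURCE B (Python) =====
-- AGGREGATOR_DOMAINS = [
--     "indeed", "glassdoor", "ziprecruiter", "workopolis",
--     "eluta", "builtin", "monster", "careerbuilder",
--     "simplyhired", "jobbank", "workday", "bebee",
--     "sercanto", "jobzmall", "pitchmeai", "showbizjobs"
-- ]
--
-- def extract_best_apply_link(apply_options: list) -> dict:
--     # Single pass: return company_site as soon as a non-aggregator link appears,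
--     # otherwise remember the first linkedin-containing option for after the loop.
--     if not apply_options:
--         return {"type": "unknown", "link": ""}
--     candidate = None
--     for option in apply_options:
--         link = option.get("link", "").lower()
--         if not any(agg in link for agg in AGGREGATOR_DOMAINS):
--             return {"type": "company_site", "link": option["link"]}
--         if candidate is None and "linkedin" in link:
--             candidate = option
--     if candidate is not None:
--         return {"type": "linkedin", "link": candidate["link"]}
--     return {"type": "other", "link": apply_options[0].get("link", "")}
-- ===== Notes on version B (the rewrite author's own statement) =====
-- stated objective: alternative
-- what changed: A's two sequential scans over apply_options (first for a non-aggregator link, then a full rescan for a linkedin link) are fused into one loop that returns company_site immediately and carries the first linkedin candidate as state, with the linkedin/other/fallback choice decided after the loop.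
import Mathlib
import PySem

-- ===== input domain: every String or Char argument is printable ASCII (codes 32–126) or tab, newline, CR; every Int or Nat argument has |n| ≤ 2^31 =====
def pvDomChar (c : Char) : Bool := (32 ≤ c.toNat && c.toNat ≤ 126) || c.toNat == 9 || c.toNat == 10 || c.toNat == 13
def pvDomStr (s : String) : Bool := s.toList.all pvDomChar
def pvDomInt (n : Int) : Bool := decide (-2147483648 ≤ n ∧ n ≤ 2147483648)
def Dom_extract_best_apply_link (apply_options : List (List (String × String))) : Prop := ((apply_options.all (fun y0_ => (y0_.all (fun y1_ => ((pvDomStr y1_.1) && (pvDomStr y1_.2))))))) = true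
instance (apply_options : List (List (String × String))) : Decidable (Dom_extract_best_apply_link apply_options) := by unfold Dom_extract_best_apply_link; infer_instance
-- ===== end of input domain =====

-- B replaces A's two sequential scans by a single loop that returns company_site
-- immediately and remembers the first linkedin option (objective: alternative decomposition).


-- ===== PORT A =====
def pvAggs : List String :=
  ["indeed", "glassdoor", "ziprecruiter", "workopolis",
   "eluta", "builtin", "monster", "careerbuilder",
   "simplyhired", "jobbank", "workday", "bebee",
   "sercanto", "jobzmall", "pitchmeai", "showbizjobs"]

-- option.get("link", "").lower()
def pvLow (o : List (String × String)) : String :=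
  PySem.Str.lower (PySem.Dict.getD (PySem.Dict.mk o) "link" "")

-- any(agg in link for agg in AGGREGATOR_DOMAINS)
def pvHasAgg (o : List (String × String)) : Bool :=
  pvAggs.any (fun agg => PySem.Str.isIn agg (pvLow o))

-- "linkedin" in option.get("link", "").lower()
def pvHasLi (o : List (String × String)) : Bool :=
  PySem.Str.isIn "linkedin" (pvLow o)

-- option["link"]: first-match lookup; Pre_ guarantees the key is present wherever
-- this is evaluated, so the "" default is never the result on admitted inputs.
def pvLinkVal (o : List (String × String)) : String :=
  (PySem.Dict.get? (PySem.Dict.mk o) "link").getD ""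

-- first 'for option in apply_options' loop of A
def pvLoop1 : List (List (String × String)) → Option (List (String × String))
  | [] => none
  | o :: rest =>
    if !(pvHasAgg o) then some [("type", "company_site"), ("link", pvLinkVal o)]
    else pvLoop1 rest

-- second 'for option in apply_options' loop of A
def pvLoop2 : List (List (String × String)) → Option (List (String × String))
  | [] => none
  | o :: rest =>
    if pvHasLi o then some [("type", "linkedin"), ("link", pvLinkVal o)]
    else pvLoop2 rest

def extract_best_apply_link (apply_options : List (List (String × String))) : List (String × String) :=
  match apply_options with
  | [] => [("type", "unknown"), ("link", "")]
  | o0 :: rest =>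
    match pvLoop1 (o0 :: rest) with
    | some r => r
    | none =>
      match pvLoop2 (o0 :: rest) with
      | some r => r
      | none => [("type", "other"), ("link", PySem.Dict.getD (PySem.Dict.mk o0) "link" "")]

-- ===== PORT B =====
-- the single loop of Source B: cand is the stored linkedin candidate, fb the "other" fallback
def pvLoopB : List (List (String × String)) → Option (List (String × String)) → List (String × String) → List (String × String)
  | [], cand, fb =>
    match cand with
    | some c => [("type", "linkedin"), ("link", pvLinkVal c)]
    | none => fb
  | o :: rest, cand, fb =>
    if !(pvHasAgg o) then [("type", "company_site"), ("link", pvLinkVal o)]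
    else pvLoopB rest (if cand.isNone && pvHasLi o then some o else cand) fb

def extract_best_apply_link_alt (apply_options : List (List (String × String))) : List (String × String) :=
  match apply_options with
  | [] => [("type", "unknown"), ("link", "")]
  | o0 :: rest =>
    pvLoopB (o0 :: rest) none [("type", "other"), ("link", PySem.Dict.getD (PySem.Dict.mk o0) "link" "")]

-- ===== PRECONDITION & SPEC =====
-- Pre_ excludes exactly the inputs on which Python A raises KeyError: those where the
-- first option whose link contains no aggregator domain lacks the "link" key.
def Pre_extract_best_apply_link (apply_options : List (List (String × String))) : Prop :=
  ∀ i (hi : i < apply_options.length),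
    (∀ j (_ : j < i), pvHasAgg apply_options[j] = true) →
    pvHasAgg apply_options[i] = false →
    (PySem.Dict.get? (PySem.Dict.mk apply_options[i]) "link").isSome = true
instance (apply_options : List (List (String × String))) : Decidable (Pre_extract_best_apply_link apply_options) := by unfold Pre_extract_best_apply_link; infer_instance

def pvWitness_extract_best_apply_link : (List (List (String × String))) :=
  [[("link", "jobs.indeed.com/x")], [("link", "careers.mysite.com/apply")]]

def Spec_extract_best_apply_link (apply_options : List (List (String × String))) (out : List (String × String)) : Prop := out = extract_best_apply_link_alt apply_options
instance (apply_options : List (List (String × String))) (out : List (String × String)) : Decidable (Spec_extract_best_apply_link apply_options out) := by unfold Spec_extract_best_apply_link; infer_instance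

-- ===== CLAIM (what is proved, stated in full; the proofs are below) =====
def Claim_equal_extract_best_apply_link : Prop := ∀ (apply_options : List (List (String × String))), Dom_extract_best_apply_link apply_options → Pre_extract_best_apply_link apply_options → Spec_extract_best_apply_link apply_options (extract_best_apply_link apply_options)

-- ===== LEMMAS AND PROOFS =====
-- B's single loop computes A's two-scan result: company_site at the first
-- non-aggregator option, else the stored/first linkedin option, else the fallback.
theorem pvLoopB_eq (l : List (List (String × String)))
    (cand : Option (List (String × String))) (fb : List (String × String)) :
    pvLoopB l cand fb =
      match pvLoop1 l with
      | some r => r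
      | none =>
        match cand with
        | some c => [("type", "linkedin"), ("link", pvLinkVal c)]
        | none =>
          match pvLoop2 l with
          | some r => r
          | none => fb := by
  induction l generalizing cand with
  | nil => cases cand <;> simp [pvLoopB, pvLoop1, pvLoop2]
  | cons o rest ih =>
    by_cases hA : pvHasAgg o = true
    · cases cand with
      | some c =>
        simp [pvLoopB, pvLoop1, hA, ih]
      | none =>
        by_cases hL : pvHasLi o = true
        · simp [pvLoopB, pvLoop1, pvLoop2, hA, hL, ih]
        · simp [pvLoopB, pvLoop1, pvLoop2, hA, hL, ih]
    · simp [pvLoopB, pvLoop1, hA]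

-- ===== VERDICT (by name: the statement is the Claim_ definition above) =====
theorem extract_best_apply_link_spec : Claim_equal_extract_best_apply_link := by
  intro apply_options _ _
  unfold Spec_extract_best_apply_link
  cases apply_options with
  | nil => rfl
  | cons o0 rest =>
    simp only [extract_best_apply_link, extract_best_apply_link_alt, pvLoopB_eq]
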